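-- pv_equiv track=rewrite | github.com/josepato87/patternMatching | src/pattern_matcher.py | get_best_match_candidate
-- ===== SOURCE A (Python) =====
-- WILDCARD = '*'
--
-- def get_best_match_candidate(match_candidates):
--     fewest_wildcards = []
--     wildcard_quantity = None
--
--     for candidate in match_candidates:
--         candidate_wildcards = candidate.count(WILDCARD)
--
--         if wildcard_quantity is None:
--             wildcard_quantity = candidate_wildcards
--             fewest_wildcards.append(candidate)
--         else:
--             if candidate_wildcards < wildcard_quantity:
--                 wildcard_quantity = candidate_wildcards
--                 fewest_wildcards[:] = []
--                 fewest_wildcards.append(candidate)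
--             elif candidate_wildcards == wildcard_quantity:
--                 fewest_wildcards.append(candidate)
--
--     if len(fewest_wildcards) == 1:
--         return fewest_wildcards[0]
--     else:
--         return tie_breaker(fewest_wildcards)
--
-- def tie_breaker(pattern_elements):
--     winner = None
--     highest_score = None
--
--     for pattern in pattern_elements:
--         index_sum = sum([i for i, v in enumerate(pattern) if v == WILDCARD])
--
--         if highest_score is None:
--             highest_score = index_sum
--             winner = pattern
--         elif index_sum > highest_score:
--             highest_score = index_sum
--             winner = pattern
--
--     return winner
-- ===== SOURCE B (Python) =====
-- WILDCARD = '*'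
--
--
-- def _key(candidate):
--     return (-candidate.count(WILDCARD),
--             sum(i for i, v in enumerate(candidate) if v == WILDCARD))
--
--
-- def get_best_match_candidate(match_candidates):
--     candidates = list(match_candidates)
--     if not candidates:
--         return None
--     return max(candidates, key=_key)
-- ===== Notes on version B (the rewrite author's own statement) =====
-- stated objective: simpler
-- what changed: Replaces the two-phase running-min/tie-list bookkeeping plus separate tie_breaker loop by one guarded max() over a composite key (-wildcard_count, wildcard_index_sum).
import Mathlib
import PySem

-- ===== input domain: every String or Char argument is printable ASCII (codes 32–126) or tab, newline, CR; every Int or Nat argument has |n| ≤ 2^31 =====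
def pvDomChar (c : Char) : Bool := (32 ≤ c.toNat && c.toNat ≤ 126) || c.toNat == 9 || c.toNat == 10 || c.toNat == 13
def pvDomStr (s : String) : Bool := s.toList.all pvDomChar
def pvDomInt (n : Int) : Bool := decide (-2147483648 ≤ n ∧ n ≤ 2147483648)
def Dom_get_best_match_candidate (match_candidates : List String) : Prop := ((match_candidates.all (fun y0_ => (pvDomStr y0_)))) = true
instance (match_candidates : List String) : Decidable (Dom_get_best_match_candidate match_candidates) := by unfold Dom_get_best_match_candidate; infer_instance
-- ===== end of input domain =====

-- B replaces A's two-phase running-min/tie-list bookkeeping plus separate tie_breaker pass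
-- by one guarded first-maximal selection over the composite key (-wildcard count, wildcard index sum): simpler.

-- ===== PORT A =====
-- candidate.count('*')  (shared subexpression of A's main loop and of B's key)
def pvCountStar (s : String) : Int := (PySem.Str.count s "*" : Int)

-- sum([i for i, v in enumerate(pattern) if v == WILDCARD])  (shared by tie_breaker and B's key)
def pvIndexSum (s : String) : Int :=
  (((PySem.List.enumerate s.toList 0).filter (fun p => p.2 == '*')).map (fun p => p.1)).sum

-- body of tie_breaker's loop: state (winner, highest_score)
def pvTbStep (st : Option String × Option Int) (pattern : String) : Option String × Option Int :=
  let index_sum := pvIndexSum pattern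
  match st.2 with
  | none => (some pattern, some index_sum)
  | some hs => if index_sum > hs then (some pattern, some index_sum) else st

def tie_breaker (pattern_elements : List String) : Option String :=
  (pattern_elements.foldl pvTbStep (none, none)).1

-- body of A's loop: state (fewest_wildcards, wildcard_quantity)
def pvAStep (st : List String × Option Int) (candidate : String) : List String × Option Int :=
  let candidate_wildcards := pvCountStar candidate
  match st.2 with
  | none => (st.1 ++ [candidate], some candidate_wildcards)
  | some q =>
    if candidate_wildcards < q then ([candidate], some candidate_wildcards)
    else if candidate_wildcards = q then (st.1 ++ [candidate], some q)
    else st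

-- A's trailing 'if len(fewest_wildcards) == 1: … else: tie_breaker(…)'
def pvAFinal (st : List String × Option Int) : Option String :=
  if st.1.length = 1 then PySem.List.pyGet? st.1 0 else tie_breaker st.1

def get_best_match_candidate (match_candidates : List String) : Option String :=
  pvAFinal (match_candidates.foldl pvAStep ([], none))

-- ===== PORT B =====
-- _key(candidate)
def pvKey (c : String) : Int × Int := (-(pvCountStar c), pvIndexSum c)

-- strict lexicographic > on Python's 2-tuples of ints
def pvLexGt (a b : Int × Int) : Bool := a.1 > b.1 || (a.1 == b.1 && a.2 > b.2)

-- one step of max(candidates, key=_key): keep first maximal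
def pvBStep (best : Option (String × (Int × Int))) (c : String) : Option (String × (Int × Int)) :=
  let k := pvKey c
  match best with
  | none => some (c, k)
  | some (b, bk) => if pvLexGt k bk then some (c, k) else some (b, bk)

def get_best_match_candidate_alt (match_candidates : List String) : Option String :=
  match match_candidates with
  | [] => none
  | _ => (match_candidates.foldl pvBStep none).map (fun p => p.1)

-- ===== PRECONDITION & SPEC =====
def Spec_get_best_match_candidate (match_candidates : List String) (out : Option String) : Prop := out = get_best_match_candidate_alt match_candidates
instance (match_candidates : List String) (out : Option String) : Decidable (Spec_get_best_match_candidate match_candidates out) := by unfold Spec_get_best_match_candidate; infer_instance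

-- ===== CLAIM (what is proved, stated in full; the proofs are below) =====
def Claim_equal_get_best_match_candidate : Prop := ∀ (match_candidates : List String), Dom_get_best_match_candidate match_candidates → Spec_get_best_match_candidate match_candidates (get_best_match_candidate match_candidates)

-- ===== LEMMAS AND PROOFS =====

-- Invariant carried through the remaining input l:
--   A's state is (fewest, some m) with every member of fewest having m stars,
--   tie_breaker's fold over fewest ends in (some w, some s) with s the index sum of w,
--   and B's state is some (w, (-m, s)).
lemma pv_main (l : List String) : ∀ (fewest : List String) (m : Int) (w : String) (s : Int),
    fewest.foldl pvTbStep (none, none) = (some w, some s) →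
    s = pvIndexSum w →
    (∀ c ∈ fewest, pvCountStar c = m) →
    fewest ≠ [] →
    pvAFinal (l.foldl pvAStep (fewest, some m))
      = (l.foldl pvBStep (some (w, (-m, s)))).map (fun p => p.1) := by
  induction l with
  | nil =>
    intro fewest m w s htb hs hall hne
    simp only [List.foldl_nil, Option.map_some]
    unfold pvAFinal
    by_cases h1 : fewest.length = 1
    · obtain ⟨c, hc⟩ := List.length_eq_one_iff.mp h1
      subst hc
      simp only [List.foldl_cons, List.foldl_nil, pvTbStep] at htb
      simp only [Prod.mk.injEq, Option.some.injEq] at htb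
      simp [PySem.List.pyGet?, PySem.List.pyIdx?, htb.1]
    · simp only [h1, if_false, tie_breaker, htb]
  | cons x rest ih =>
    intro fewest m w s htb hs hall hne
    simp only [List.foldl_cons]
    rcases lt_trichotomy (pvCountStar x) m with hlt | heq | hgt
    · -- fewer wildcards: both reset to x
      have ha : pvAStep (fewest, some m) x = ([x], some (pvCountStar x)) := by
        simp [pvAStep, hlt]
      have hb : pvBStep (some (w, (-m, s))) x = some (x, (-(pvCountStar x), pvIndexSum x)) := by
        simp only [pvBStep, pvKey, pvLexGt]
        simp [show (-m : Int) < -(pvCountStar x) by omega]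
      rw [ha, hb]
      exact ih [x] (pvCountStar x) x (pvIndexSum x)
        (by simp [pvTbStep]) rfl (by intro c hc; simp at hc; subst hc; rfl) (by simp)
    · -- equal: A appends, B updates iff index sum strictly larger
      have ha : pvAStep (fewest, some m) x = (fewest ++ [x], some m) := by
        simp [pvAStep, heq]
      have htb' : (fewest ++ [x]).foldl pvTbStep (none, none)
          = pvTbStep (some w, some s) x := by
        rw [List.foldl_append, htb]; simp
      have hall' : ∀ c ∈ fewest ++ [x], pvCountStar c = m := by
        intro c hc
        rcases List.mem_append.mp hc with h | h
        · exact hall c h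
        · simp at h; subst h; exact heq
      by_cases hgt2 : pvIndexSum x > s
      · have hb : pvBStep (some (w, (-m, s))) x = some (x, (-m, pvIndexSum x)) := by
          simp only [pvBStep, pvKey, pvLexGt, heq]
          simp [hgt2]
        rw [ha, hb]
        refine ih (fewest ++ [x]) m x (pvIndexSum x) ?_ rfl hall' (by simp)
        rw [htb']; simp [pvTbStep, hgt2]
      · have hb : pvBStep (some (w, (-m, s))) x = some (w, (-m, s)) := by
          simp only [pvBStep, pvKey, pvLexGt, heq]
          simp [hgt2]
        rw [ha, hb]
        refine ih (fewest ++ [x]) m w s ?_ hs hall' (by simp)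
        rw [htb']; simp [pvTbStep, hgt2]
    · -- more wildcards: both keep state
      have ha : pvAStep (fewest, some m) x = (fewest, some m) := by
        simp only [pvAStep]
        rw [if_neg (by omega), if_neg (by omega)]
      have hb : pvBStep (some (w, (-m, s))) x = some (w, (-m, s)) := by
        simp only [pvBStep, pvKey, pvLexGt]
        have h1 : ¬ ((-m : Int) < -(pvCountStar x)) := by omega
        have h2 : ¬ ((-(pvCountStar x) : Int) = -m) := by omega
        simp [h1, h2]
      rw [ha, hb]
      exact ih fewest m w s htb hs hall hne

-- ===== VERDICT (by name: the statement is the Claim_ definition above) =====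
theorem get_best_match_candidate_spec : Claim_equal_get_best_match_candidate := by
  intro match_candidates _
  unfold Spec_get_best_match_candidate
  cases match_candidates with
  | nil => rfl
  | cons c rest =>
    unfold get_best_match_candidate get_best_match_candidate_alt
    simp only [List.foldl_cons]
    have ha : pvAStep ([], none) c = ([c], some (pvCountStar c)) := by simp [pvAStep]
    have hb : pvBStep none c = some (c, (-(pvCountStar c), pvIndexSum c)) := by
      simp [pvBStep, pvKey]
    rw [ha, hb]
    exact (pv_main rest [c] (pvCountStar c) c (pvIndexSum c)
      (by simp [pvTbStep]) rfl (by intro d hd; simp at hd; subst hd; rfl) (by simp))
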